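-- pv_equiv track=rewrite | github.com/vmelnic/soma | soma-synthesizer/soma_synthesizer/data.py | find_span
-- ===== SOURCE A (Python) =====
-- def find_span(tokens: list[str], param_tokens: list[str]) -> tuple[int, int] | None:
--     """Find *param_tokens* as a contiguous subsequence of *tokens*.
--
--     Returns ``(start, end)`` **inclusive** (0-based into *tokens*), or
--     ``None`` if not found.
--     """
--     if not param_tokens:
--         return None
--     n = len(param_tokens)
--     for i in range(len(tokens) - n + 1):
--         if tokens[i:i + n] == param_tokens:
--             return (i, i + n - 1)
--     return None
-- ===== SOURCE B (Python) =====
-- def find_span(tokens: list[str], param_tokens: list[str]) -> tuple[int, int] | None: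
--     """Find *param_tokens* as a contiguous subsequence of *tokens*.
--
--     Returns ``(start, end)`` **inclusive** (0-based into *tokens*), or
--     ``None`` if not found.  KMP: build the failure table (longest proper
--     border of every needle prefix), then sweep the text once, never
--     re-reading consumed text tokens.
--     """
--     if not param_tokens:
--         return None
--     p = param_tokens
--     m = len(p)
--     fail = [0] * (m + 1)
--     k = 0
--     for q in range(1, m):
--         while k and p[q] != p[k]:
--             k = fail[k]
--         if p[q] == p[k]:
--             k = k + 1
--         fail[q + 1] = k
--     q = 0
--     for i, tok in enumerate(tokens):
--         while q and tok != p[q]: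
--             q = fail[q]
--         if tok == p[q]:
--             q += 1
--             if q == m:
--                 return (i - m + 1, i)
--     return None
-- ===== Notes on version B (the rewrite author's own statement) =====
-- stated objective: alternative
-- what changed: Replaces A's slice-comparison of the whole needle at every window position with a KMP search: a failure table (longest proper border of each needle prefix) drives a single left-to-right scan that never re-reads consumed text tokens.
import Mathlib
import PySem

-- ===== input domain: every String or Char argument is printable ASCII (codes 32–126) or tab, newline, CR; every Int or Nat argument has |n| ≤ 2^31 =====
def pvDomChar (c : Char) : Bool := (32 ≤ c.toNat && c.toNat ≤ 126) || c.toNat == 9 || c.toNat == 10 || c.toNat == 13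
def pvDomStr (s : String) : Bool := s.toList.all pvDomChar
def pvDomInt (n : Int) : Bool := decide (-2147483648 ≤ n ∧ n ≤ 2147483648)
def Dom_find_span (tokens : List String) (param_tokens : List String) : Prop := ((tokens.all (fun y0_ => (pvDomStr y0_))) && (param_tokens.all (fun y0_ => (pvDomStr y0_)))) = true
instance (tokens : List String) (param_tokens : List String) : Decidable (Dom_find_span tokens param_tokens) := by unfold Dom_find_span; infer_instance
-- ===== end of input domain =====

-- B replaces A's slice-comparison of the whole needle at every window position by a
-- KMP search: it builds the failure table (longest proper border of every needle
-- prefix) and then sweeps the text once, never re-reading consumed text tokens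
-- (objective: alternative algorithm; fewer token comparisons, not measured faster).

-- ===== PORT A =====
-- the 'for i in range(...)' loop with its early return
def find_span_loop (tokens : List String) (param_tokens : List String) (n : Int) :
    List Int → Option (Int × Int)
  | [] => none
  | i :: is =>
    if PySem.List.slice tokens (some i) (some (i + n)) = param_tokens then
      some (i, i + n - 1)
    else
      find_span_loop tokens param_tokens n is

def find_span (tokens : List String) (param_tokens : List String) : Option (Int × Int) :=
  if param_tokens = [] then none
  else
    let n : Int := PySem.List.len param_tokens
    find_span_loop tokens param_tokens n
      (PySem.List.pyRange 0 (PySem.List.len tokens - n + 1) 1)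

-- ===== PORT B =====
-- B's 'while k/q and x != p[k]' loop (it occurs verbatim twice in Source B); the fuel only
-- guards totality (the state strictly decreases and stays ≤ m, so fuel m is never
-- exhausted); p[k] is ported as getD with a dummy default, exact because the loop only
-- reads indices < len p
def kmp_fail_step (p : List String) (fail : List Nat) (tok : String) : Nat → Nat → Nat
  | 0, q => q
  | f + 1, q =>
    if q ≠ 0 ∧ tok ≠ p.getD q "" then kmp_fail_step p fail tok f (fail.getD q 0)
    else q

-- B's 'for q in range(1, m)' table-building loop; 'fail[q+1] = k' is List.set on the
-- preallocated [0]*(m+1); range(1, m) is ported as List.range' 1 (m-1), exact since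
-- both enumerate 1, 2, …, m-1
def kmp_build (p : List String) (m : Nat) : List Nat → Nat → List Nat → List Nat
  | fail, _, [] => fail
  | fail, k, q :: qs =>
    let k' := kmp_fail_step p fail (p.getD q "") m k
    let k'' := if p.getD q "" = p.getD k' "" then k' + 1 else k'
    kmp_build p m (fail.set (q + 1) k'') k'' qs

-- B's 'for i, tok in enumerate(tokens)' scan loop
def kmp_scan (p : List String) (fail : List Nat) (m : Nat) :
    List String → Nat → Nat → Option (Int × Int)
  | [], _, _ => none
  | tok :: ts, i, q =>
    let q' := kmp_fail_step p fail tok m q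
    if tok = p.getD q' "" then
      if q' + 1 = m then some (((i + 1 - m : Nat) : Int), (i : Int))
      else kmp_scan p fail m ts (i + 1) (q' + 1)
    else kmp_scan p fail m ts (i + 1) q'

def find_span_alt (tokens : List String) (param_tokens : List String) : Option (Int × Int) :=
  match param_tokens with
  | [] => none
  | _ :: _ =>
    let m := param_tokens.length
    let fail := kmp_build param_tokens m (List.replicate (m + 1) 0) 0 (List.range' 1 (m - 1))
    kmp_scan param_tokens fail m tokens 0 0

-- ===== PRECONDITION & SPEC =====
def Spec_find_span (tokens : List String) (param_tokens : List String) (out : Option (Int × Int)) : Prop := out = find_span_alt tokens param_tokens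
instance (tokens : List String) (param_tokens : List String) (out : Option (Int × Int)) : Decidable (Spec_find_span tokens param_tokens out) := by unfold Spec_find_span; infer_instance

-- ===== CLAIM (what is proved, stated in full; the proofs are below) =====
def Claim_equal_find_span : Prop := ∀ (tokens : List String) (param_tokens : List String), Dom_find_span tokens param_tokens → Spec_find_span tokens param_tokens (find_span tokens param_tokens)

-- ===== LEMMAS AND PROOFS =====

-- canonical form: index of the first match at position ≥ k
def firstMatchFrom (t p : List String) (k : Nat) : Option Nat :=
  (List.range' k (t.length + 1 - p.length - k)).find? (fun j => (t.drop j).take p.length == p)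

-- peel one position
theorem firstMatchFrom_peel (t p : List String) (k : Nat) (hk : k < t.length + 1 - p.length) :
    firstMatchFrom t p k =
      if (t.drop k).take p.length = p then some k else firstMatchFrom t p (k + 1) := by
  unfold firstMatchFrom
  have hc : t.length + 1 - p.length - k = (t.length + 1 - p.length - (k + 1)) + 1 := by omega
  rw [hc, List.range'_succ, List.find?_cons]
  by_cases h : (t.drop k).take p.length = p
  · simp [h]
  · have hb : ((t.drop k).take p.length == p) = false := beq_eq_false_iff_ne.mpr h
    simp [hb, h]

theorem firstMatchFrom_stop (t p : List String) (k : Nat) (hk : t.length + 1 - p.length ≤ k) :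
    firstMatchFrom t p k = none := by
  unfold firstMatchFrom
  have hc : t.length + 1 - p.length - k = 0 := by omega
  rw [hc]
  rfl

-- skip a region with no match
theorem firstMatchFrom_skip (t p : List String) (k k' : Nat) (hkk : k ≤ k')
    (h : ∀ j, k ≤ j → j < k' → (t.drop j).take p.length ≠ p) :
    firstMatchFrom t p k = firstMatchFrom t p k' := by
  induction k' with
  | zero =>
    have : k = 0 := by omega
    simp [this]
  | succ m ih =>
    rcases Nat.lt_or_ge k (m + 1) with hlt | hge
    · have hk : k ≤ m := by omega
      rw [ih hk (fun j h1 h2 => h j h1 (by omega))]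
      rcases Nat.lt_or_ge m (t.length + 1 - p.length) with hm | hm
      · rw [firstMatchFrom_peel t p m hm, if_neg (h m hk (by omega))]
      · rw [firstMatchFrom_stop t p m hm, firstMatchFrom_stop t p (m + 1) (by omega)]
    · have : k = m + 1 := by omega
      simp [this]

-- A's loop computes firstMatchFrom
theorem loopA_eq (t p : List String) (k : Nat) :
    find_span_loop t p (p.length : Int) (PySem.List.pyRange (k : Int) ((t.length : Int) - (p.length : Int) + 1) 1)
      = (firstMatchFrom t p k).map (fun j => ((j : Int), (j : Int) + (p.length : Int) - 1)) := by
  suffices H : ∀ c k, t.length + 1 - p.length - k ≤ c →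
      find_span_loop t p (p.length : Int)
          (PySem.List.pyRange (k : Int) ((t.length : Int) - (p.length : Int) + 1) 1)
        = (firstMatchFrom t p k).map (fun j => ((j : Int), (j : Int) + (p.length : Int) - 1)) by
    exact H _ k le_rfl
  intro c
  induction c with
  | zero =>
    intro k hk
    have hk' : t.length + 1 - p.length ≤ k := by omega
    rw [PySem.List.pyRange_one_eq_nil (by omega), firstMatchFrom_stop t p k hk']
    rfl
  | succ c ih =>
    intro k hk
    rcases Nat.lt_or_ge k (t.length + 1 - p.length) with hlt | hge
    · rw [PySem.List.pyRange_one_cons (show (k : Int) < (t.length : Int) - (p.length : Int) + 1 by omega)]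
      rw [firstMatchFrom_peel t p k hlt]
      show (if PySem.List.slice t (some (k : Int)) (some ((k : Int) + (p.length : Int))) = p then _ else _) = _
      rw [PySem.List.slice_natCast_add]
      by_cases hm : (t.drop k).take p.length = p
      · simp [hm]
      · rw [if_neg hm, if_neg hm]
        have : ((k : Int) + 1) = ((k + 1 : Nat) : Int) := by push_cast; ring
        rw [this, ih (k + 1) (by omega)]
    · rw [PySem.List.pyRange_one_eq_nil (by omega), firstMatchFrom_stop t p k hge]
      rfl

-- r is a border of the prefix p[:q] (r = q allowed: the trivial border)
def isBorder (p : List String) (q r : Nat) : Prop :=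
  r ≤ q ∧ p.take r = (p.take q).drop (q - r)

-- specification function for the failure table: the longest proper border of p[:q],
-- characterized by direct downward search (proof-side only; B computes it via kmp_build)
def border_loop (p : List String) (q : Nat) : Nat → Nat
  | 0 => 0
  | k + 1 =>
    if p.take (k + 1) = (p.drop (q - (k + 1))).take (k + 1) then k + 1
    else border_loop p q k

def border (p : List String) (q : Nat) : Nat := border_loop p q (q - 1)

theorem isBorder_refl (p : List String) (q : Nat) : isBorder p q q :=
  ⟨le_rfl, by simp⟩

theorem isBorder_zero (p : List String) (q : Nat) : isBorder p q 0 :=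
  ⟨Nat.zero_le _, by simp⟩

theorem isBorder_trans (p : List String) {q r s : Nat}
    (h1 : isBorder p q r) (h2 : isBorder p r s) : isBorder p q s := by
  obtain ⟨hr, er⟩ := h1
  obtain ⟨hs, es⟩ := h2
  refine ⟨hs.trans hr, ?_⟩
  rw [es, er, List.drop_drop]
  congr 1
  omega

-- two borders of the same prefix are chained
theorem isBorder_chain (p : List String) {q b1 b2 : Nat}
    (h1 : isBorder p q b1) (h2 : isBorder p q b2) (h12 : b1 ≤ b2) :
    isBorder p b2 b1 := by
  obtain ⟨hb1, e1⟩ := h1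
  obtain ⟨hb2, e2⟩ := h2
  refine ⟨h12, ?_⟩
  rw [e2, List.drop_drop, e1]
  congr 1
  omega

-- the downward search in border_loop finds the maximal border ≤ k
theorem border_loop_spec (p : List String) (q : Nat) :
    ∀ k, k < q →
      isBorder p q (border_loop p q k) ∧ border_loop p q k ≤ k ∧
        (∀ j, border_loop p q k < j → j ≤ k → ¬ isBorder p q j) := by
  intro k
  induction k with
  | zero =>
    intro _
    exact ⟨isBorder_zero p q, le_rfl, fun j h1 h2 _ => by omega⟩
  | succ k ih =>
    intro hk
    have hkq : k < q := by omega
    unfold border_loop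
    by_cases hc : p.take (k + 1) = (p.drop (q - (k + 1))).take (k + 1)
    · rw [if_pos hc]
      refine ⟨⟨by omega, ?_⟩, le_rfl, fun j h1 h2 _ => by omega⟩
      rw [hc, List.drop_take]
      congr 1
      omega
    · rw [if_neg hc]
      obtain ⟨hb, hle, hmax⟩ := ih hkq
      refine ⟨hb, hle.trans (by omega), fun j h1 h2 hj => ?_⟩
      rcases Nat.lt_or_ge j (k + 1) with hj' | hj'
      · exact hmax j h1 (by omega) hj
      · have hjk : j = k + 1 := by omega
        subst hjk
        obtain ⟨_, ej⟩ := hj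
        apply hc
        rw [ej, List.drop_take]
        congr 1
        omega

theorem border_spec (p : List String) (q : Nat) (hq : 1 ≤ q) :
    isBorder p q (border p q) ∧ border p q < q ∧
      (∀ j, border p q < j → j < q → ¬ isBorder p q j) := by
  have h := border_loop_spec p q (q - 1) (by omega)
  unfold border
  exact ⟨h.1, by omega, fun j h1 h2 => h.2.2 j h1 (by omega)⟩

-- the maximal proper border is unique
theorem border_unique (p : List String) (Q x : Nat) (hQ : 1 ≤ Q)
    (hx : isBorder p Q x) (hxlt : x < Q)
    (hmax : ∀ j, x < j → j < Q → ¬ isBorder p Q j) : x = border p Q := by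
  obtain ⟨hb, hlt, hm⟩ := border_spec p Q hQ
  rcases Nat.lt_trichotomy x (border p Q) with h | h | h
  · exact absurd hb (hmax _ h hlt)
  · exact h
  · exact absurd hx (hm _ h hxlt)

-- pointwise characterization of borders
theorem isBorder_iff (p : List String) (q r : Nat) (_hq : q ≤ p.length) (hr : r ≤ q) :
    isBorder p q r ↔ ∀ j, j < r → p[j]? = p[q - r + j]? := by
  unfold isBorder
  constructor
  · rintro ⟨-, e⟩ j hj
    have h1 := congrArg (fun l => l[j]?) e
    simp only at h1
    rwa [List.getElem?_take_of_lt hj, List.getElem?_drop,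
      List.getElem?_take_of_lt (by omega : q - r + j < q)] at h1
  · intro h
    refine ⟨hr, List.ext_getElem? fun j => ?_⟩
    by_cases hj : j < r
    · rw [List.getElem?_take_of_lt hj, List.getElem?_drop,
        List.getElem?_take_of_lt (by omega : q - r + j < q)]
      exact h j hj
    · rw [List.getElem?_eq_none (by simp [List.length_take]; omega),
        List.getElem?_eq_none (by simp [List.length_drop, List.length_take]; omega)]

-- growing a border by one matching token
theorem isBorder_succ (p : List String) (q b : Nat) (hq : q < p.length) (hb : b ≤ q) :
    isBorder p (q + 1) (b + 1) ↔ (isBorder p q b ∧ p[b]? = p[q]?) := by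
  rw [isBorder_iff p (q + 1) (b + 1) (by omega) (by omega), isBorder_iff p q b (by omega) hb]
  constructor
  · intro h
    refine ⟨fun j hj => ?_, ?_⟩
    · have := h j (by omega)
      rwa [show q + 1 - (b + 1) + j = q - b + j by omega] at this
    · have := h b (by omega)
      rwa [show q + 1 - (b + 1) + b = q by omega] at this
  · rintro ⟨h1, h2⟩ j hj
    rcases Nat.lt_or_ge j b with hjb | hjb
    · have := h1 j hjb
      rwa [show q - b + j = q + 1 - (b + 1) + j by omega] at this
    · have hjb' : j = b := by omega
      rw [hjb']
      rwa [show q + 1 - (b + 1) + b = q by omega]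

-- getD agrees with getElem? inside the list
theorem getD_eq_of_lt (p : List String) (a : Nat) (ha : a < p.length) :
    p[a]? = some (p.getD a "") := by
  rw [List.getD_eq_getElem?_getD, List.getElem?_eq_getElem ha]
  rfl

-- the while-loop: given a correct table below q, its result q' is a border of p[:q],
-- it stops at 0 or at a token match, and every skipped border r carries a mismatch
theorem fail_step_spec (p : List String) (tok : String) (fail : List Nat) :
    ∀ fuel q, q ≤ fuel → (∀ r, 1 ≤ r → r ≤ q → fail.getD r 0 = border p r) →
      isBorder p q (kmp_fail_step p fail tok fuel q) ∧
      (kmp_fail_step p fail tok fuel q = 0 ∨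
        tok = p.getD (kmp_fail_step p fail tok fuel q) "") ∧
      (∀ r, kmp_fail_step p fail tok fuel q < r →
        r ≤ q → isBorder p q r → tok ≠ p.getD r "") := by
  intro fuel
  induction fuel with
  | zero =>
    intro q hq _
    have : q = 0 := by omega
    subst this
    exact ⟨isBorder_refl p 0, Or.inl rfl, fun r h1 h2 _ => by omega⟩
  | succ fuel ih =>
    intro q hq htab
    unfold kmp_fail_step
    by_cases hc : q ≠ 0 ∧ tok ≠ p.getD q ""
    · rw [if_pos hc]
      rw [htab q (by omega) le_rfl]
      obtain ⟨hb1, hblt, hbmax⟩ := border_spec p q (by omega)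
      obtain ⟨ih1, ih2, ih3⟩ := ih (border p q) (by omega)
        (fun r h1 h2 => htab r h1 (h2.trans (by omega)))
      refine ⟨isBorder_trans p hb1 ih1, ih2, fun r h1 h2 hr => ?_⟩
      rcases Nat.lt_or_ge r q with hrq | hrq
      · have hrb : r ≤ border p q := by
          by_contra hcon
          exact hbmax r (by omega) hrq hr
        exact ih3 r h1 hrb (isBorder_chain p hr hb1 hrb)
      · have : r = q := by omega
        subst this
        exact fun he => hc.2 he
    · rw [if_neg hc]
      refine ⟨isBorder_refl p q, ?_, fun r h1 h2 _ => by omega⟩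
      rcases Decidable.em (q = 0) with h0 | h0
      · exact Or.inl h0
      · exact Or.inr (by_contra fun hne => hc ⟨h0, hne⟩)

-- the table-building loop fills fail[r] with border p r for every r ≤ len p
theorem kmp_build_spec (p : List String) :
    ∀ (n q : Nat) (fail : List Nat) (k : Nat), n = p.length - q → 1 ≤ q → q ≤ p.length →
      fail.length = p.length + 1 →
      k = border p q →
      (∀ r, r ≤ q → fail.getD r 0 = border p r) →
      ∀ r, r ≤ p.length →
        (kmp_build p p.length fail k (List.range' q (p.length - q))).getD r 0 = border p r := by
  intro n
  induction n with
  | zero =>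
    intro q fail k hn hq1 hqlen _ _ hfail r hr
    have hq : q = p.length := by omega
    rw [show p.length - q = 0 by omega]
    exact hfail r (by omega)
  | succ n ihn =>
    intro q fail k hn hq1 hqlen hlen hk hfail r hr
    have hqlt : q < p.length := by omega
    rw [show p.length - q = n + 1 by omega, List.range'_succ, kmp_build]
    obtain ⟨hkb, hklt, hkmax⟩ := border_spec p q hq1
    rw [← hk] at hkb hklt hkmax
    obtain ⟨hW1, hW2, hW3⟩ := fail_step_spec p (p.getD q "") fail p.length k (by omega)
      (fun r h1 h2 => hfail r (by omega))
    set tok := p.getD q "" with htok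
    set k' := kmp_fail_step p fail tok p.length k with hk'def
    have hk'k : k' ≤ k := hW1.1
    have hk'q : isBorder p q k' := isBorder_trans p hkb hW1
    -- the new entry is the longest proper border of p[:q+1]
    have hnew : (if tok = p.getD k' "" then k' + 1 else k') = border p (q + 1) := by
      by_cases hm : tok = p.getD k' ""
      · rw [if_pos hm]
        apply border_unique p (q + 1) (k' + 1) (by omega)
        · refine (isBorder_succ p q k' hqlt (by omega)).mpr ⟨hk'q, ?_⟩
          rw [getD_eq_of_lt p k' (by omega), getD_eq_of_lt p q hqlt, ← hm, htok]
        · omega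
        · intro j h1 h2 hj
          have hj1 : 1 ≤ j := by omega
          obtain ⟨hbq, hbe⟩ := (isBorder_succ p q (j - 1) hqlt (by omega)).mp
            (by rwa [show j - 1 + 1 = j by omega])
          have hble : j - 1 ≤ k := by
            by_contra hcon
            exact hkmax (j - 1) (by omega) (by omega) hbq
          have hbd : tok = p.getD (j - 1) "" := by
            have e1 := getD_eq_of_lt p (j - 1) (by omega)
            have e2 := getD_eq_of_lt p q hqlt
            rw [e1, e2] at hbe
            rw [htok]
            exact (Option.some.injEq _ _ ▸ hbe.symm :)
          exact hW3 (j - 1) (by omega) hble (isBorder_chain p hbq hkb hble) hbd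
      · rw [if_neg hm]
        have hk0 : k' = 0 := by
          rcases hW2 with h | h
          · exact h
          · exact absurd h hm
        rw [hk0]
        apply border_unique p (q + 1) 0 (by omega) (isBorder_zero p (q + 1)) (by omega)
        intro j h1 h2 hj
        obtain ⟨hbq, hbe⟩ := (isBorder_succ p q (j - 1) hqlt (by omega)).mp
          (by rwa [show j - 1 + 1 = j by omega])
        have hbd : tok = p.getD (j - 1) "" := by
          have e1 := getD_eq_of_lt p (j - 1) (by omega)
          have e2 := getD_eq_of_lt p q hqlt
          rw [e1, e2] at hbe
          rw [htok]
          exact (Option.some.injEq _ _ ▸ hbe.symm :)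
        rcases Nat.eq_zero_or_pos (j - 1) with h0 | h0
        · apply hm
          rw [hk0, ← h0]
          exact hbd
        · have hble : j - 1 ≤ k := by
            by_contra hcon
            exact hkmax (j - 1) (by omega) (by omega) hbq
          exact hW3 (j - 1) (by omega) hble (isBorder_chain p hbq hkb hble) hbd
    rw [hnew]
    have hgoal := ihn (q + 1) (fail.set (q + 1) (border p (q + 1))) (border p (q + 1))
      (by omega) (by omega) (by omega) (by simp [hlen]) rfl
      (fun r' hr' => by
        rcases Nat.lt_or_ge r' (q + 1) with h | h
        · rw [List.getD_eq_getElem?_getD, List.getElem?_set_ne (by omega),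
            ← List.getD_eq_getElem?_getD]
          exact hfail r' (by omega)
        · have : r' = q + 1 := by omega
          subst this
          rw [List.getD_eq_getElem?_getD, List.getElem?_set_self (by omega)]
          rfl)
      r hr
    rw [show p.length - (q + 1) = n by omega] at hgoal
    exact hgoal

-- the partial match travels down a border
theorem border_window (t p : List String) (i q q' : Nat) (hqi : q ≤ i)
    (hb : isBorder p q q') (hpart : (t.drop (i - q)).take q = p.take q) :
    (t.drop (i - q')).take q' = p.take q' := by
  obtain ⟨hle, heq⟩ := hb
  have h1 : t.drop (i - q') = (t.drop (i - q)).drop (q - q') := by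
    rw [List.drop_drop]
    congr 1
    omega
  rw [h1, heq, ← hpart, List.drop_take]
  congr 1
  omega

-- a full match starting inside the current window yields a border with tok = p[r]
theorem match_in_window (t p : List String) (i q s : Nat) (tok : String)
    (hqi : q ≤ i) (hqm : q < p.length)
    (hpart : (t.drop (i - q)).take q = p.take q)
    (htok : t[i]? = some tok)
    (hs1 : i - q ≤ s) (hs2 : s < i)
    (hmatch : (t.drop s).take p.length = p) :
    isBorder p q (i - s) ∧ tok = p.getD (i - s) "" := by
  set r := i - s with hr
  have hrq : r ≤ q := by omega
  have hr1 : 1 ≤ r := by omega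
  constructor
  · refine ⟨hrq, ?_⟩
    have e1 : (t.drop s).take r = p.take r := by
      have := congrArg (List.take r) hmatch
      rwa [List.take_take, Nat.min_eq_left (hrq.trans (le_of_lt hqm))] at this
    have e2 : (t.drop s).take r = (p.take q).drop (q - r) := by
      have h1 : t.drop s = (t.drop (i - q)).drop (q - r) := by
        rw [List.drop_drop]
        congr 1
        omega
      rw [h1, ← hpart, List.drop_take]
      congr 1
      omega
    rw [← e1, e2]
  · have hrlen : r < p.length := by omega
    have e3 : p[r]? = some tok := by
      rw [← hmatch]
      rw [List.getElem?_take_of_lt hrlen, List.getElem?_drop]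
      have : s + r = i := by omega
      rw [this, htok]
    rw [List.getD_eq_getElem?_getD, e3]
    rfl

-- extend the partial match by the current token
theorem window_extend (t p : List String) (i q' : Nat) (tok : String)
    (hqi : q' ≤ i) (hqm : q' < p.length)
    (hpart : (t.drop (i - q')).take q' = p.take q')
    (htok : t[i]? = some tok) (he : tok = p.getD q' "") :
    (t.drop (i - q')).take (q' + 1) = p.take (q' + 1) := by
  rw [List.take_add_one, List.take_add_one, hpart]
  congr 1
  have h1 : (t.drop (i - q'))[q']? = some tok := by
    rw [List.getElem?_drop]
    have : i - q' + q' = i := by omega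
    rw [this, htok]
  have h2 : p[q']? = some tok := by
    rw [he, List.getD_eq_getElem?_getD]
    rw [(List.getElem?_eq_getElem hqm)]
    rfl
  rw [h1, h2]

-- B's scan loop from state (i, q) computes the first match at position ≥ i - q
theorem kmp_scan_eq (t p : List String) (fail : List Nat)
    (htab : ∀ r, 1 ≤ r → r ≤ p.length → fail.getD r 0 = border p r) :
    ∀ ts i q, 1 ≤ p.length → q < p.length → q ≤ i → ts = t.drop i →
      (t.drop (i - q)).take q = p.take q →
      kmp_scan p fail p.length ts i q
        = (firstMatchFrom t p (i - q)).map
            (fun j => ((j : Int), (j : Int) + (p.length : Int) - 1)) := by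
  intro ts
  induction ts with
  | nil =>
    intro i q hm1 hq hqi hts _
    have hlen : t.length ≤ i := by
      have := congrArg List.length hts
      simp [List.length_drop] at this
      omega
    rw [firstMatchFrom_stop t p (i - q) (by omega)]
    rfl
  | cons tok ts' ih =>
    intro i q hm1 hq hqi hts hpart
    have hil : i < t.length := by
      by_contra h
      have hnil : t.drop i = [] := List.drop_eq_nil_of_le (by omega)
      rw [hnil] at hts
      exact List.cons_ne_nil _ _ hts
    have htok : t[i]? = some tok := by
      have : t.drop i = tok :: ts' := hts.symm
      rw [← List.head?_drop, this]
      rfl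
    have hts' : ts' = t.drop (i + 1) := by
      have h2 := congrArg List.tail (hts.symm)
      rw [List.tail_drop, List.tail_cons] at h2
      exact h2.symm
    obtain ⟨hW1, hW2, hW3⟩ := fail_step_spec p tok fail p.length q (le_of_lt hq)
      (fun r h1 h2 => htab r h1 (h2.trans (le_of_lt hq)))
    set q' := kmp_fail_step p fail tok p.length q with hq'def
    have hq'q : q' ≤ q := hW1.1
    have hpart' : (t.drop (i - q')).take q' = p.take q' := border_window t p i q q' hqi hW1 hpart
    -- no full match starts in [i - q, i - q')
    have hskip : ∀ s, i - q ≤ s → s < i - q' → (t.drop s).take p.length ≠ p := by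
      intro s h1 h2 hmatch
      have hs : s < i := by omega
      obtain ⟨hbr, htr⟩ := match_in_window t p i q s tok hqi hq hpart htok h1 hs hmatch
      exact hW3 (i - s) (by omega) (by omega) hbr htr
    rw [firstMatchFrom_skip t p (i - q) (i - q') (by omega) hskip]
    show kmp_scan p fail p.length (tok :: ts') i q = _
    rw [kmp_scan]
    rw [← hq'def]
    by_cases he : tok = p.getD q' ""
    · rw [if_pos he]
      have hext : (t.drop (i - q')).take (q' + 1) = p.take (q' + 1) :=
        window_extend t p i q' tok (by omega) (by omega) hpart' htok he
      by_cases hfin : q' + 1 = p.length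
      · rw [if_pos hfin]
        have hfull : (t.drop (i - q')).take p.length = p := by
          rw [← hfin, hext, hfin, List.take_length]
        rw [firstMatchFrom_peel t p (i - q') (by omega), if_pos hfull]
        show some (((i + 1 - p.length : Nat) : Int), (i : Int))
          = some (((i - q' : Nat) : Int), ((i - q' : Nat) : Int) + (p.length : Int) - 1)
        simp only [Option.some.injEq, Prod.mk.injEq]
        constructor <;> omega
      · rw [if_neg hfin]
        have hiq : i - q' = (i + 1) - (q' + 1) := by omega
        rw [ih (i + 1) (q' + 1) hm1 (by omega) (by omega) hts' (by rw [← hiq]; exact hext), hiq]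
    · rw [if_neg he]
      have hq0 : q' = 0 := by
        rcases hW2 with h | h
        · exact h
        · exact absurd h he
      -- also no match starting exactly at i
      have hskip2 : ∀ s, i - q' ≤ s → s < i + 1 → (t.drop s).take p.length ≠ p := by
        intro s h1 h2 hmatch
        rcases Nat.lt_or_ge s i with hs | hs
        · obtain ⟨hbr, htr⟩ := match_in_window t p i q' s tok (by omega) (by omega) hpart' htok h1 hs hmatch
          have : i - s = 0 := by
            by_contra hne
            obtain ⟨hle, _⟩ := hbr
            omega
          omega
        · have hsi : s = i := by omega
          subst hsi
          apply he
          have h0 : p[0]? = some tok := by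
            rw [← hmatch, List.getElem?_take_of_lt (by omega), List.getElem?_drop, Nat.add_zero, htok]
          rw [hq0, List.getD_eq_getElem?_getD, h0]
          rfl
      rw [firstMatchFrom_skip t p (i - q') (i + 1) (by omega) hskip2]
      have : (i + 1) - q' = i + 1 := by omega
      rw [ih (i + 1) q' hm1 (by omega) (by omega) hts' (by simp [hq0])]
      rw [this]

-- ===== VERDICT (by name: the statement is the Claim_ definition above) =====
theorem find_span_spec : Claim_equal_find_span := by
  intro tokens param_tokens _
  unfold Spec_find_span
  cases param_tokens with
  | nil => simp [find_span, find_span_alt]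
  | cons first rest =>
    show find_span tokens (first :: rest) = find_span_alt tokens (first :: rest)
    rw [find_span, find_span_alt]
    simp only [if_neg (List.cons_ne_nil first rest), PySem.List.len_eq]
    have hm1 : 1 ≤ (first :: rest).length := by simp
    have htab : ∀ r, r ≤ (first :: rest).length →
        (kmp_build (first :: rest) (first :: rest).length
          (List.replicate ((first :: rest).length + 1) 0) 0
          (List.range' 1 ((first :: rest).length - 1))).getD r 0 = border (first :: rest) r := by
      intro r hr
      apply kmp_build_spec (first :: rest) ((first :: rest).length - 1) 1 _ 0 rfl le_rfl hm1
        (by simp) rfl ?_ r hr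
      intro r' hr'
      have hb0 : border (first :: rest) r' = 0 := by
        interval_cases r' <;> rfl
      rw [hb0, List.getD_eq_getElem?_getD, List.getElem?_replicate]
      rw [if_pos (by omega)]
      rfl
    have hA := loopA_eq tokens (first :: rest) 0
    have hB := kmp_scan_eq tokens (first :: rest) _ (fun r _ h2 => htab r h2)
      tokens 0 0 hm1 (by simp) le_rfl rfl (by simp)
    simpa using hA.trans hB.symm
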